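-- pv_equiv track=rewrite | github.com/iloveat/label_simplify | 05-xwal2lab-eng.py | rearFinal
-- ===== SOURCE A (Python) =====
-- rear_nasal=('an','en','ian','in','uan','uen','van','vn','ang','eng','iang','ing','iong','ong','uang','ueng')
--
-- rear_open=('a','ao','e','ia','iao','ie','io','o','ua','uo','ve','ii','iii')
--
-- rear_protruded=('v')
--
-- rear_retroflex=('air','angr','aor','eir','engr','er','iaor','iar','ingr','iour','ir','our','uair','uangr','ueir','uor','ur' \
-- ,'vanr','ver','vnr')
--
-- rear_round=('iou','ou','u')
--
-- rear_strectched=('ai','ei','i','uai','uei')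
--
-- def rearFinal(tmp):
--   for i in range(len(rear_nasal)):
--     if(rear_nasal[i]==tmp):
--       ret=1
--       return ret
--   for i in range(len(rear_open)):
--     if(rear_open[i]==tmp):
--       ret=3
--       return ret
--   for i in range(len(rear_protruded)):
--     if(rear_protruded[i]==tmp):
--       ret=4
--       return ret
--   for i in range(len(rear_retroflex)):
--     if(rear_retroflex[i]==tmp):
--       ret=5
--       return ret
--   for i in range(len(rear_round)):
--     if(rear_round[i]==tmp):
--       ret=6
--       return ret
--   for i in range(len(rear_strectched)):
--     if(rear_strectched[i]==tmp):
--       ret=7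
--       return ret
--   if('nil'==tmp or 'sp'==tmp or 'sil'==tmp):
--     ret=2
--   else:
--     ret=0
--   return ret
-- ===== SOURCE B (Python) =====
-- # trie-style classification: consume tmp one character at a time, narrowing a
-- # candidate (suffix, code) set, instead of six sequential whole-string scans
-- _PAIRS = [(s, c) for group, c in (
--     (('an','en','ian','in','uan','uen','van','vn','ang','eng','iang','ing','iong','ong','uang','ueng'), 1),
--     (('a','ao','e','ia','iao','ie','io','o','ua','uo','ve','ii','iii'), 3),
--     (('v',), 4),
--     (('air','angr','aor','eir','engr','er','iaor','iar','ingr','iour','ir','our','uair','uangr','ueir','uor','ur',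
--       'vanr','ver','vnr'), 5),
--     (('iou','ou','u'), 6),
--     (('ai','ei','i','uai','uei'), 7),
--     (('nil','sp','sil'), 2),
-- ) for s in group]
--
-- def rearFinal(tmp):
--     cands = _PAIRS
--     for ch in tmp:
--         cands = [(k[1:], c) for k, c in cands if k and k[0] == ch]
--         if not cands:
--             return 0
--     for k, c in cands:
--         if not k:
--             return c
--     return 0
-- ===== Notes on version B (the rewrite author's own statement) =====
-- stated objective: alternative
-- what changed: Replaces A's six sequential whole-string scans with a trie-style traversal: B consumes tmp one character at a time, narrowing a single flat (suffix, code) candidate list and returning the code of the surviving empty-suffix candidate (0 when the candidates run out).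
import Mathlib
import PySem

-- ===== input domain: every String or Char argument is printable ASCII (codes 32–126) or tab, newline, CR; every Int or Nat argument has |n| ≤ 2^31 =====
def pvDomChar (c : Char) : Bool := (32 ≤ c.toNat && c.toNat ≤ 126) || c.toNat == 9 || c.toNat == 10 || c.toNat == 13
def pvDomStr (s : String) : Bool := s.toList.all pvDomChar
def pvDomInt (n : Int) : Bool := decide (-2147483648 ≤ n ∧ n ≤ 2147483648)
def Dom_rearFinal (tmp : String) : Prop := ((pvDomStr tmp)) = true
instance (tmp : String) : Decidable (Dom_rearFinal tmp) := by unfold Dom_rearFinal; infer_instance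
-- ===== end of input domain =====

-- B classifies by a trie-style character-by-character narrowing of a candidate list instead of A's six sequential whole-string scans (objective: alternative).

-- ===== PORT A =====
-- the module-level tuples, as in the Python source
def rear_nasal : List String := ["an","en","ian","in","uan","uen","van","vn","ang","eng","iang","ing","iong","ong","uang","ueng"]
def rear_open : List String := ["a","ao","e","ia","iao","ie","io","o","ua","uo","ve","ii","iii"]
-- ('v') in Python is the plain string 'v'; the loop over it visits its single character, so it behaves as ["v"]
def rear_protruded : List String := ["v"]
def rear_retroflex : List String := ["air","angr","aor","eir","engr","er","iaor","iar","ingr","iour","ir","our","uair","uangr","ueir","uor","ur","vanr","ver","vnr"]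
def rear_round : List String := ["iou","ou","u"]
def rear_strectched : List String := ["ai","ei","i","uai","uei"]

-- 'for i in range(len(t)): if t[i]==tmp: return …' — a scan with early exit, as structural recursion
def pvScanEq : List String → String → Bool
  | [], _ => false
  | x :: xs, tmp => if x == tmp then true else pvScanEq xs tmp

def rearFinal (tmp : String) : Int :=
  if pvScanEq rear_nasal tmp then 1
  else if pvScanEq rear_open tmp then 3
  else if pvScanEq rear_protruded tmp then 4
  else if pvScanEq rear_retroflex tmp then 5
  else if pvScanEq rear_round tmp then 6
  else if pvScanEq rear_strectched tmp then 7
  else if "nil" == tmp || "sp" == tmp || "sil" == tmp then 2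
  else 0

-- ===== PORT B =====
-- Source B's module-level flat pair list: [(s, c) for group, c in (…) for s in group];
-- keys are Python strings indexed/sliced char by char, so they are ported as List Char
def pvGroupsB : List (List String × Int) :=
  [(["an","en","ian","in","uan","uen","van","vn","ang","eng","iang","ing","iong","ong","uang","ueng"], 1),
   (["a","ao","e","ia","iao","ie","io","o","ua","uo","ve","ii","iii"], 3),
   (["v"], 4),
   (["air","angr","aor","eir","engr","er","iaor","iar","ingr","iour","ir","our","uair","uangr","ueir","uor","ur","vanr","ver","vnr"], 5),
   (["iou","ou","u"], 6),
   (["ai","ei","i","uai","uei"], 7),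
   (["nil","sp","sil"], 2)]

def pvPairsB : List (List Char × Int) :=
  pvGroupsB.flatMap (fun gc => gc.1.map (fun s => (s.toList, gc.2)))

-- 'cands = [(k[1:], c) for k, c in cands if k and k[0] == ch]' — k[0]/k[1:] on a char-list key
def pvNarrow (ch : Char) (cands : List (List Char × Int)) : List (List Char × Int) :=
  cands.filterMap (fun p =>
    match p.1 with
    | [] => none
    | c :: rest => if c == ch then some (rest, p.2) else none)

-- the final loop: first candidate whose remaining key is empty, else 0
def pvFinish : List (List Char × Int) → Int
  | [] => 0
  | (k, c) :: rest => if k.isEmpty then c else pvFinish rest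

-- 'for ch in tmp: … if not cands: return 0' — recursion over the characters of tmp
def pvWalk : List Char → List (List Char × Int) → Int
  | [], cands => pvFinish cands
  | ch :: rest, cands =>
      let c' := pvNarrow ch cands
      if c'.isEmpty then 0 else pvWalk rest c'

def rearFinal_alt (tmp : String) : Int := pvWalk tmp.toList pvPairsB

-- ===== PRECONDITION & SPEC =====
def Spec_rearFinal (tmp : String) (out : Int) : Prop := out = rearFinal_alt tmp
instance (tmp : String) (out : Int) : Decidable (Spec_rearFinal tmp out) := by unfold Spec_rearFinal; infer_instance

-- ===== CLAIM (what is proved, stated in full; the proofs are below) =====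
def Claim_equal_rearFinal : Prop := ∀ (tmp : String), Dom_rearFinal tmp → Spec_rearFinal tmp (rearFinal tmp)

-- ===== LEMMAS AND PROOFS =====
set_option maxRecDepth 4096

-- the association value B's walk computes: code of the first pair whose key equals the whole input
def pvAssoc (cands : List (List Char × Int)) (chars : List Char) : Int :=
  match cands.find? (fun p => p.1 == chars) with
  | some p => p.2
  | none => 0

theorem pvScanEq_eq_contains (l : List String) (tmp : String) : pvScanEq l tmp = l.contains tmp := by
  induction l with
  | nil => rfl
  | cons x xs ih =>
      simp [pvScanEq, ih]
      by_cases h : x = tmp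
      · simp [h]
      · simp [h, Ne.symm h]

theorem find?_narrow (ch : Char) (rest : List Char) (cands : List (List Char × Int)) :
    (pvNarrow ch cands).find? (fun p => p.1 == rest) =
      (cands.find? (fun p => p.1 == ch :: rest)).map (fun p => (rest, p.2)) := by
  induction cands with
  | nil => rfl
  | cons p cs ih =>
      obtain ⟨k, c⟩ := p
      cases k with
      | nil => simpa [pvNarrow, List.find?] using ih
      | cons c0 kr =>
          by_cases h0 : c0 = ch
          · subst h0
            by_cases hk : kr = rest
            · simp [pvNarrow, List.find?, hk]
            · have hb : ((c0 :: kr : List Char) == c0 :: rest) = false := by simp [hk]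
              have hb2 : ((kr : List Char) == rest) = false := by simp [hk]
              simpa [pvNarrow, List.find?, hb, hb2] using ih
          · have hb : ((c0 :: kr : List Char) == ch :: rest) = false := by simp [h0]
            simpa [pvNarrow, List.find?, h0, hb] using ih

theorem pvFinish_eq (cands : List (List Char × Int)) : pvFinish cands = pvAssoc cands [] := by
  induction cands with
  | nil => rfl
  | cons p cs ih =>
      obtain ⟨k, c⟩ := p
      cases k with
      | nil => simp [pvFinish, pvAssoc, List.find?]
      | cons c0 kr => simpa [pvFinish, pvAssoc, List.find?] using ih

theorem pvWalk_eq (chars : List Char) : ∀ cands, pvWalk chars cands = pvAssoc cands chars := by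
  induction chars with
  | nil => intro cands; simpa [pvWalk] using pvFinish_eq cands
  | cons ch rest ih =>
      intro cands
      by_cases hemp : (pvNarrow ch cands).isEmpty
      · have h0 : (pvNarrow ch cands).find? (fun p => p.1 == rest) = none := by
          rw [List.isEmpty_iff] at hemp; simp [hemp]
        have := find?_narrow ch rest cands
        rw [h0] at this
        have hnone : cands.find? (fun p => p.1 == ch :: rest) = none := by
          cases hfind : cands.find? (fun p => p.1 == ch :: rest) with
          | none => rfl
          | some p => rw [hfind] at this; simp at this
        simp [pvWalk, hemp, pvAssoc, hnone]
      · simp only [pvWalk]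
        rw [if_neg hemp]
        rw [ih (pvNarrow ch cands)]
        unfold pvAssoc
        rw [find?_narrow]
        cases cands.find? (fun p => p.1 == ch :: rest) <;> simp

theorem find?_constGroup (l : List String) (c : Int) (tmp : String) :
    ((l.map (fun s => (s.toList, c))).find? (fun p => p.1 == tmp.toList)) =
      if tmp ∈ l then some (tmp.toList, c) else none := by
  induction l with
  | nil => simp
  | cons s ls ih =>
      by_cases h : s = tmp
      · subst h; simp
      · have hne : s.toList ≠ tmp.toList := fun he => h (by
          have h2 := congrArg String.ofList he
          rwa [String.ofList_toList, String.ofList_toList] at h2)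
        simp [hne, ih, Ne.symm h]

theorem pvPairsB_eq : pvPairsB =
    rear_nasal.map (fun s => (s.toList, (1:Int))) ++
    (rear_open.map (fun s => (s.toList, (3:Int))) ++
    (rear_protruded.map (fun s => (s.toList, (4:Int))) ++
    (rear_retroflex.map (fun s => (s.toList, (5:Int))) ++
    (rear_round.map (fun s => (s.toList, (6:Int))) ++
    (rear_strectched.map (fun s => (s.toList, (7:Int))) ++
    ["nil","sp","sil"].map (fun s => (s.toList, (2:Int)))))))) := by
  simp [pvPairsB, pvGroupsB, List.flatMap, rear_nasal, rear_open, rear_protruded,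
    rear_retroflex, rear_round, rear_strectched]

theorem rearFinal_agree (tmp : String) : rearFinal tmp = rearFinal_alt tmp := by
  rw [rearFinal, rearFinal_alt, pvWalk_eq, pvPairsB_eq]
  unfold pvAssoc
  simp only [List.find?_append, pvScanEq_eq_contains, find?_constGroup]
  by_cases h1 : tmp ∈ rear_nasal
  · simp [h1]
  · by_cases h2 : tmp ∈ rear_open
    · simp [h1, h2]
    · by_cases h3 : tmp ∈ rear_protruded
      · simp [h1, h2, h3]
      · by_cases h4 : tmp ∈ rear_retroflex
        · simp [h1, h2, h3, h4]
        · by_cases h5 : tmp ∈ rear_round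
          · simp [h1, h2, h3, h4, h5]
          · by_cases h6 : tmp ∈ rear_strectched
            · simp [h1, h2, h3, h4, h5, h6]
            · by_cases h7 : tmp = "nil" ∨ tmp = "sp" ∨ tmp = "sil"
              · simp [h1, h2, h3, h4, h5, h6, h7, or_assoc,
                  eq_comm (a := "nil"), eq_comm (a := "sp"), eq_comm (a := "sil")]
              · simp [h1, h2, h3, h4, h5, h6, h7, or_assoc,
                  eq_comm (a := "nil"), eq_comm (a := "sp"), eq_comm (a := "sil")]

-- ===== VERDICT (by name: the statement is the Claim_ definition above) =====
theorem rearFinal_spec : Claim_equal_rearFinal := by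
  intro tmp _
  unfold Spec_rearFinal
  exact rearFinal_agree tmp
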